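-- pv_equiv track=rewrite | github.com/tamlog06/Atcoder-Beginner-Contest | problems/ABC/260/c/abc260_c.py | solve
-- ===== SOURCE A (Python) =====
-- def solve(N, X, Y):
--     A = 1
--     B = 0
--     if N == 1:
--         return 0
--     for i in range(N-1):
--         B += A*X
--         A += B
--         B *= Y
--
--     return B
-- ===== SOURCE B (Python) =====
-- def solve(N, X, Y):
--     # Matrix-power re-implementation: the loop is the linear map
--     # (A,B) -> ((1+X)*A + B, X*Y*A + Y*B), i.e. left-multiplication by
--     # M = [[1+X, 1], [X*Y, Y]]; the answer is the (1,0) entry of M^(N-1).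
--     if N <= 1:
--         return 0
--
--     def mul(P, Q):
--         return (P[0]*Q[0] + P[1]*Q[2], P[0]*Q[1] + P[1]*Q[3],
--                 P[2]*Q[0] + P[3]*Q[2], P[2]*Q[1] + P[3]*Q[3])
--
--     def mpow(M, e):
--         if e == 0:
--             return (1, 0, 0, 1)
--         H = mpow(M, e // 2)
--         H2 = mul(H, H)
--         return mul(H2, M) if e % 2 == 1 else H2
--
--     P = mpow((1 + X, 1, X * Y, Y), N - 1)
--     return P[2]
-- ===== Notes on version B (the rewrite author's own statement) =====
-- stated objective: alternative
-- what changed: Replaced the N-1-step iteration of the linear recurrence by binary exponentiation of the 2x2 matrix M=[[1+X,1],[X*Y,Y]], returning the (1,0) entry of M^(N-1).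
import Mathlib
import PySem

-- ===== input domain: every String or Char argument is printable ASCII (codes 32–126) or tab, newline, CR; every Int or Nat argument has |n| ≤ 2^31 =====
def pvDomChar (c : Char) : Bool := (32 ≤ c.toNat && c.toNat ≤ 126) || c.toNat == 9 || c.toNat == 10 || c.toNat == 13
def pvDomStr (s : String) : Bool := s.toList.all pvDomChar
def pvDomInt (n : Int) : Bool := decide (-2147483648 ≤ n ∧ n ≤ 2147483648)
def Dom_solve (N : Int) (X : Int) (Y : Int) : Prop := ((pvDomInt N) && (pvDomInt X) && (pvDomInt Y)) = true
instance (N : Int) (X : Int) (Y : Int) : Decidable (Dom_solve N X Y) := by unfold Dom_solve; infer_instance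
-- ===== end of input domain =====

-- B replaces the N-1-step loop by binary exponentiation of the 2x2 recurrence matrix (objective: alternative decomposition).

-- ===== PORT A =====
def solve (N : Int) (X : Int) (Y : Int) : Int :=
  -- A = 1; B = 0; if N == 1: return 0; for i in range(N-1): B += A*X; A += B; B *= Y; return B
  if N == 1 then 0
  else
    (PySem.List.pyRange 0 (N - 1) 1).foldl
      (fun (s : Int × Int) _ =>
        let B := s.2 + s.1 * X
        let A := s.1 + B
        let B := B * Y
        (A, B)) ((1 : Int), (0 : Int)) |>.2

-- ===== PORT B =====
-- mul(P, Q): 2x2 integer matrix product on 4-tuples (row-major)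
def pvMul (P Q : Int × Int × Int × Int) : Int × Int × Int × Int :=
  (P.1 * Q.1 + P.2.1 * Q.2.2.1, P.1 * Q.2.1 + P.2.1 * Q.2.2.2,
   P.2.2.1 * Q.1 + P.2.2.2 * Q.2.2.1, P.2.2.1 * Q.2.1 + P.2.2.2 * Q.2.2.2)

-- mpow(M, e): binary exponentiation (e is a non-negative exponent; Source B only calls it with e = N-1 ≥ 1)
def pvMpow (M : Int × Int × Int × Int) (e : Nat) : Int × Int × Int × Int :=
  if h : e = 0 then (1, 0, 0, 1)
  else
    let H := pvMpow M (e / 2)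
    let H2 := pvMul H H
    if e % 2 == 1 then pvMul H2 M else H2
  decreasing_by exact Nat.div_lt_self (Nat.pos_of_ne_zero h) (by norm_num)

def solve_alt (N : Int) (X : Int) (Y : Int) : Int :=
  if N ≤ 1 then 0
  else
    let P := pvMpow (1 + X, 1, X * Y, Y) (N - 1).toNat
    P.2.2.1

-- ===== PRECONDITION & SPEC =====
def Spec_solve (N : Int) (X : Int) (Y : Int) (out : Int) : Prop := out = solve_alt N X Y
instance (N : Int) (X : Int) (Y : Int) (out : Int) : Decidable (Spec_solve N X Y out) := by unfold Spec_solve; infer_instance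

-- ===== CLAIM (what is proved, stated in full; the proofs are below) =====
def Claim_equal_solve : Prop := ∀ (N : Int) (X : Int) (Y : Int), Dom_solve N X Y → Spec_solve N X Y (solve N X Y)

-- ===== LEMMAS AND PROOFS =====

-- naive right-multiplication power, the bridge between the loop and pvMpow
def pvNpw (M : Int × Int × Int × Int) : Nat → Int × Int × Int × Int
  | 0 => (1, 0, 0, 1)
  | n + 1 => pvMul (pvNpw M n) M

theorem pvMul_assoc (P Q R : Int × Int × Int × Int) :
    pvMul (pvMul P Q) R = pvMul P (pvMul Q R) := by
  obtain ⟨a, b, c, d⟩ := P; obtain ⟨e, f, g, h⟩ := Q; obtain ⟨i, j, k, l⟩ := R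
  simp only [pvMul, Prod.mk.injEq]
  refine ⟨by ring, by ring, by ring, by ring⟩

theorem pvMul_one (P : Int × Int × Int × Int) : pvMul P (1, 0, 0, 1) = P := by
  obtain ⟨a, b, c, d⟩ := P
  simp [pvMul]

theorem pvNpw_add (M : Int × Int × Int × Int) (a b : Nat) :
    pvNpw M (a + b) = pvMul (pvNpw M a) (pvNpw M b) := by
  induction b with
  | zero => simp [pvNpw, pvMul_one]
  | succ n ih =>
    show pvNpw M (a + n + 1) = _
    rw [pvNpw, ih, pvNpw, pvMul_assoc]

theorem pvMpow_eq_npw (M : Int × Int × Int × Int) (e : Nat) :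
    pvMpow M e = pvNpw M e := by
  induction e using Nat.strong_induction_on with
  | _ e ih =>
    rw [pvMpow]
    by_cases h : e = 0
    · simp [h, pvNpw]
    · simp only [h, dite_false]
      rw [ih (e / 2) (Nat.div_lt_self (Nat.pos_of_ne_zero h) (by norm_num))]
      rw [← pvNpw_add]
      by_cases h2 : e % 2 = 1
      · have he : e = e / 2 + e / 2 + 1 := by omega
        simp only [h2, beq_self_eq_true, if_true]
        rw [show pvMul (pvNpw M (e / 2 + e / 2)) M = pvNpw M (e / 2 + e / 2 + 1) from rfl,
          ← he]
      · have he : e / 2 + e / 2 = e := by omega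
        simp [h2, he]

-- left multiplication agrees (powers commute with M)
theorem pvNpw_succ_left (M : Int × Int × Int × Int) (n : Nat) :
    pvNpw M (n + 1) = pvMul M (pvNpw M n) := by
  induction n with
  | zero =>
    show pvMul (pvNpw M 0) M = pvMul M (pvNpw M 0)
    obtain ⟨a, b, c, d⟩ := M; simp [pvNpw, pvMul]
  | succ n ih =>
    show pvMul (pvNpw M (n + 1)) M = _
    rw [ih, pvMul_assoc,
      show pvMul (pvNpw M n) M = pvNpw M (n + 1) from rfl, ih]

-- the loop body, named for the proofs
def pvStep (X Y : Int) (s : Int × Int) : Int × Int :=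
  (s.1 + (s.2 + s.1 * X), (s.2 + s.1 * X) * Y)

theorem foldl_const_iterate {α β : Type} (f : α → α) (l : List β) (init : α) :
    l.foldl (fun s _ => f s) init = f^[l.length] init := by
  induction l generalizing init with
  | nil => rfl
  | cons x xs ih => simp [List.foldl, ih, Function.iterate_succ_apply]

theorem iterate_step_eq (X Y : Int) (k : Nat) :
    (pvStep X Y)^[k] (1, 0) =
      ((pvNpw (1 + X, 1, X * Y, Y) k).1, (pvNpw (1 + X, 1, X * Y, Y) k).2.2.1) := by
  induction k with
  | zero => simp [pvNpw]
  | succ n ih =>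
    rw [Function.iterate_succ_apply', ih, pvNpw_succ_left]
    obtain ⟨a, b, c, d⟩ := pvNpw (1 + X, 1, X * Y, Y) n
    simp only [pvMul, pvStep, Prod.mk.injEq]
    exact ⟨by ring, by ring⟩

-- ===== VERDICT (by name: the statement is the Claim_ definition above) =====
theorem solve_spec : Claim_equal_solve := by
  intro N X Y _
  unfold Spec_solve solve solve_alt
  by_cases h1 : N ≤ 1
  · have hr : PySem.List.pyRange 0 (N - 1) 1 = [] :=
      PySem.List.pyRange_one_eq_nil (by omega)
    by_cases hN : N = 1 <;> simp [hN, h1, hr]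
  · have hN : ¬ (N = 1) := by omega
    simp only [hN, beq_iff_eq, if_neg h1]
    rw [show (fun (s : Int × Int) _ =>
        let B := s.2 + s.1 * X
        let A := s.1 + B
        let B := B * Y
        (A, B)) = (fun (s : Int × Int) (_ : Int) => pvStep X Y s) from rfl]
    rw [foldl_const_iterate, PySem.List.length_pyRange_one, iterate_step_eq,
      pvMpow_eq_npw]
    simp
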